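-- pv_equiv track=rewrite | github.com/DeanHe/Practice | LeetCodePython/GameOfLife.py | gameOfLifeInfinite
-- ===== SOURCE A (Python) =====
-- import collections
--
-- def gameOfLifeInfinite(live):
--     # include nearby dead cells, count of each cell's nearby live cell
--     ctr = collections.Counter((nb_r, nb_c)
--                                 for r, c in live
--                                 for nb_r in range(r - 1, r + 2)
--                                 for nb_c in range(c - 1, c + 2)
--                                 if nb_r != r or nb_c != c
--                               )
--     return {(r, c) for (r, c) in ctr if ctr[(r, c)] == 3 or (ctr[(r, c)] == 2 and (r, c) in live) }
-- ===== SOURCE B (Python) =====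
-- _DELTAS = [(-1, -1), (-1, 0), (-1, 1), (0, -1), (0, 1), (1, -1), (1, 0), (1, 1)]
--
--
-- def _neighbors(cell):
--     r, c = cell
--     return [(r + dr, c + dc) for dr, dc in _DELTAS]
--
--
-- def gameOfLifeInfinite(live):
--     # gather formulation: for each candidate cell, query how many of its
--     # neighbours are alive, instead of scattering counts from live cells
--     live_set = set(live)
--     candidates = set()
--     for cell in live:
--         candidates.update(_neighbors(cell))
--     result = set()
--     for p in candidates:
--         n = sum(1 for q in _neighbors(p) if q in live_set)
--         if n == 3 or (n == 2 and p in live_set):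
--             result.add(p)
--     return result
-- ===== Notes on version B (the rewrite author's own statement) =====
-- stated objective: alternative
-- what changed: Replaces A's scatter pass (a Counter accumulating +1 from every live cell onto each of its 8 neighbours, then filtering the counter's keys) by a gather pass: build the candidate set of all neighbours of live cells once, then for each candidate count its live neighbours by membership queries against a set of the live cells.
import Mathlib
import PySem

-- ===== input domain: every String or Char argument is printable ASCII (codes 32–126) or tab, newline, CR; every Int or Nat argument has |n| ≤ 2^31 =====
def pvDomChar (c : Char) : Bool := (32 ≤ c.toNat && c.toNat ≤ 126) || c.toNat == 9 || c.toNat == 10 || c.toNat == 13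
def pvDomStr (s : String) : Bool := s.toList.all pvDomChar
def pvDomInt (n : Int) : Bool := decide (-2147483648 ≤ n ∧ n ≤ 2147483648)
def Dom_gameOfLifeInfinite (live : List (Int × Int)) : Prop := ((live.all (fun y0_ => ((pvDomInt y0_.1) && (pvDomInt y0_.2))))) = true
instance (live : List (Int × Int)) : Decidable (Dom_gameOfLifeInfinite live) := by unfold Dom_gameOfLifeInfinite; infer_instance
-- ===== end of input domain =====

-- B replaces A's scatter pass (Counter of neighbour hits) by a gather pass (per-candidate
-- count of live neighbours via set membership) — an alternative decomposition, similar cost.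

-- ===== PORT A =====
-- the Counter's generator: for r,c in live, for nb_r in range(r-1,r+2), for nb_c in range(c-1,c+2), if nb_r != r or nb_c != c
def pvGenA (live : List (Int × Int)) : List (Int × Int) :=
  live.flatMap (fun rc =>
    (PySem.List.pyRange (rc.1 - 1) (rc.1 + 2) 1).flatMap (fun nr =>
      ((PySem.List.pyRange (rc.2 - 1) (rc.2 + 2) 1).filter
          (fun nc => nr != rc.1 || nc != rc.2)).map (fun nc => (nr, nc))))

def gameOfLifeInfinite (live : List (Int × Int)) : List (Int × Int) :=
  let ctr := PySem.Dict.counter (pvGenA live)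
  PySem.Set.ofList (ctr.keys.filter
    (fun p => ctr.getD p 0 == 3 || (ctr.getD p 0 == 2 && live.contains p)))

-- ===== PORT B =====
def pvDeltas : List (Int × Int) := [(-1, -1), (-1, 0), (-1, 1), (0, -1), (0, 1), (1, -1), (1, 0), (1, 1)]

def pvNeighbors (cell : Int × Int) : List (Int × Int) :=
  pvDeltas.map (fun d => (cell.1 + d.1, cell.2 + d.2))

def gameOfLifeInfinite_alt (live : List (Int × Int)) : List (Int × Int) :=
  let liveSet := PySem.Set.ofList live
  let candidates := live.foldl (fun s cell => PySem.Set.update s (pvNeighbors cell)) PySem.Set.empty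
  candidates.foldl (fun result p =>
    let n := (pvNeighbors p).countP (fun q => liveSet.contains q)
    if n == 3 || (n == 2 && liveSet.contains p) then PySem.Set.add result p else result) PySem.Set.empty

-- ===== PRECONDITION & SPEC =====
-- Pre_ is the representation invariant of A's Python argument, a set[tuple[int,int]]
-- (the List holds the set's DISTINCT elements); it excludes no actual set input.
def Pre_gameOfLifeInfinite (live : List (Int × Int)) : Prop := live.Nodup
instance (live : List (Int × Int)) : Decidable (Pre_gameOfLifeInfinite live) := by
  unfold Pre_gameOfLifeInfinite; infer_instance

def pvWitness_gameOfLifeInfinite : (List (Int × Int)) := [(0, 0), (0, 1), (0, 2)]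

def Spec_gameOfLifeInfinite (live : List (Int × Int)) (out : List (Int × Int)) : Prop := out = gameOfLifeInfinite_alt live
instance (live : List (Int × Int)) (out : List (Int × Int)) : Decidable (Spec_gameOfLifeInfinite live out) := by unfold Spec_gameOfLifeInfinite; infer_instance

-- ===== CLAIM (what is proved, stated in full; the proofs are below) =====
def Claim_equal_gameOfLifeInfinite : Prop := ∀ (live : List (Int × Int)), Dom_gameOfLifeInfinite live → Pre_gameOfLifeInfinite live → Spec_gameOfLifeInfinite live (gameOfLifeInfinite live)

-- ===== LEMMAS AND PROOFS =====

theorem pvRange3 (a : Int) : PySem.List.pyRange (a - 1) (a + 2) 1 = [a - 1, a, a + 1] := by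
  rw [PySem.List.pyRange_one_cons (by omega), PySem.List.pyRange_one_cons (by omega),
      PySem.List.pyRange_one_cons (by omega), PySem.List.pyRange_one_eq_nil (by omega)]
  norm_num

-- A's generator, per live cell, produces exactly B's neighbour list
theorem pvGenA_cell (rc : Int × Int) :
    (PySem.List.pyRange (rc.1 - 1) (rc.1 + 2) 1).flatMap (fun nr =>
      ((PySem.List.pyRange (rc.2 - 1) (rc.2 + 2) 1).filter
          (fun nc => nr != rc.1 || nc != rc.2)).map (fun nc => (nr, nc)))
      = pvNeighbors rc := by
  obtain ⟨a, b⟩ := rc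
  rw [pvRange3, pvRange3]
  have t1 : ∀ x : Int, (x - 1 != x) = true := by intro x; simp [bne_iff_ne]
  have t2 : ∀ x : Int, (x + 1 != x) = true := by intro x; simp [bne_iff_ne]
  have t3 : ∀ x : Int, (x != x) = false := by intro x; simp
  simp only [List.flatMap_cons, List.flatMap_nil, List.filter_cons, List.filter_nil,
    t1, t2, t3, Bool.true_or, Bool.false_or, if_true, List.map_cons, List.map_nil,
    List.append_nil, List.cons_append, List.nil_append]
  simp only [pvNeighbors, pvDeltas, List.map_cons, List.map_nil]
  norm_num
  omega

theorem pvGenA_eq (live : List (Int × Int)) : pvGenA live = live.flatMap pvNeighbors := by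
  unfold pvGenA
  exact List.flatMap_congr (fun rc _ => pvGenA_cell rc)

theorem pvNeighbors_nodup (p : Int × Int) : (pvNeighbors p).Nodup := by
  obtain ⟨a, b⟩ := p
  simp [pvNeighbors, pvDeltas, Prod.ext_iff]

theorem pvNeighbors_symm (p q : Int × Int) : p ∈ pvNeighbors q ↔ q ∈ pvNeighbors p := by
  obtain ⟨a, b⟩ := p; obtain ⟨x, y⟩ := q
  simp [pvNeighbors, pvDeltas, Prod.ext_iff]
  omega

-- count of p in a flatMap of duplicate-free blocks is the number of generating cells hitting p
theorem pvCount_flatMap (live : List (Int × Int)) (p : Int × Int) :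
    (live.flatMap pvNeighbors).count p = live.countP (fun q => decide (p ∈ pvNeighbors q)) := by
  induction live with
  | nil => rfl
  | cons q t ih =>
    rw [List.flatMap_cons, List.count_append, List.countP_cons, ih]
    by_cases h : p ∈ pvNeighbors q
    · rw [List.count_eq_one_of_mem (pvNeighbors_nodup q) h]
      simp [h, Nat.add_comm]
    · rw [List.count_eq_zero_of_not_mem h]
      simp [h]

-- |l₁ ∩ l₂| both ways
theorem pvCountP_mem_comm (l₁ l₂ : List (Int × Int)) (h₁ : l₁.Nodup) (h₂ : l₂.Nodup) :
    l₁.countP (fun a => decide (a ∈ l₂)) = l₂.countP (fun a => decide (a ∈ l₁)) := by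
  rw [List.countP_eq_length_filter, List.countP_eq_length_filter,
    ← List.toFinset_card_of_nodup (h₁.filter _), ← List.toFinset_card_of_nodup (h₂.filter _)]
  congr 1
  ext a
  simp [and_comm]

-- a conditional-add fold over fresh distinct elements appends the filtered list
theorem pvFoldl_add_if (cond : (Int × Int) → Bool) (c : List (Int × Int)) (s : PySem.Set (Int × Int))
    (hc : c.Nodup) (hs : ∀ p ∈ c, p ∉ s) :
    c.foldl (fun out p => if cond p then PySem.Set.add out p else out) s = s ++ c.filter cond := by
  induction c generalizing s with
  | nil => simp
  | cons p t ih =>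
    rw [List.foldl_cons, List.filter_cons]
    by_cases hcp : cond p = true
    · rw [if_pos hcp, if_pos hcp, PySem.Set.add_of_not_mem (hs p (by simp))]
      rw [ih (s ++ [p]) hc.of_cons (fun q hq => by
        simp only [List.mem_append, List.mem_singleton, not_or]
        exact ⟨hs q (by simp [hq]), fun h => (List.nodup_cons.mp hc).1 (h ▸ hq)⟩)]
      simp
    · rw [if_neg hcp, if_neg hcp]
      exact ih s hc.of_cons (fun q hq => hs q (by simp [hq]))

-- B's candidate accumulation is Set.ofList of the flatMap
theorem pvCandidates_eq (live : List (Int × Int)) :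
    live.foldl (fun s cell => PySem.Set.update s (pvNeighbors cell)) PySem.Set.empty
      = PySem.Set.ofList (live.flatMap pvNeighbors) := by
  suffices h : ∀ (l : List (Int × Int)) (s : PySem.Set (Int × Int)),
      l.foldl (fun s cell => PySem.Set.update s (pvNeighbors cell)) s
        = (l.flatMap pvNeighbors).foldl PySem.Set.add s from h live PySem.Set.empty
  intro l
  induction l with
  | nil => intro s; rfl
  | cons q t ih =>
    intro s
    rw [List.foldl_cons, List.flatMap_cons, List.foldl_append, ih]
    rfl

-- ===== VERDICT (by name: the statement is the Claim_ definition above) =====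
theorem gameOfLifeInfinite_spec : Claim_equal_gameOfLifeInfinite := by
  intro live _hdom hpre
  unfold Spec_gameOfLifeInfinite gameOfLifeInfinite gameOfLifeInfinite_alt
  simp only [pvGenA_eq, PySem.Dict.keys_counter, PySem.Dict.getD_counter, pvCandidates_eq]
  have hK : (PySem.Set.ofList (live.flatMap pvNeighbors) : List (Int × Int)).Nodup :=
    PySem.Set.nodup_ofList _
  rw [pvFoldl_add_if _ _ _ hK (by simp [PySem.Set.empty]),
    PySem.Set.ofList_eq_self_of_nodup _ (hK.filter _)]
  simp only [PySem.Set.empty, List.nil_append]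
  apply List.filter_congr
  intro p _hp
  have hcontains : ∀ x : Int × Int, (PySem.Set.ofList live).contains x = live.contains x := by
    intro x
    simp [List.contains_eq_mem, PySem.Set.mem_ofList]
  have h2 : live.countP (fun q => decide (p ∈ pvNeighbors q))
      = live.countP (fun q => decide (q ∈ pvNeighbors p)) :=
    List.countP_congr (fun q _ => by simpa using pvNeighbors_symm p q)
  have h4 : (pvNeighbors p).countP (fun a => decide (a ∈ live))
      = (pvNeighbors p).countP (fun q => (PySem.Set.ofList live).contains q) :=
    List.countP_congr (fun q _ => by simp [List.contains_eq_mem, PySem.Set.mem_ofList])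
  have hcount : (live.flatMap pvNeighbors).count p
      = (pvNeighbors p).countP (fun q => (PySem.Set.ofList live).contains q) :=
    ((pvCount_flatMap live p).trans h2).trans
      ((pvCountP_mem_comm live (pvNeighbors p) hpre (pvNeighbors_nodup p)).trans h4)
  rw [← hcount, hcontains]
  rw [Bool.eq_iff_iff]
  simp only [Bool.or_eq_true, Bool.and_eq_true, beq_iff_eq]
  norm_cast
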